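-- pv_equiv track=rewrite | github.com/Krout0n/WIN-ICPC | aoj/ITP1/5_C.py | build_line
-- ===== SOURCE A (Python) =====
-- def build_line(width, i):
--     s = ''
--     if i % 2 == 0:
--         while len(s) < width:
--             if len(s) % 2 == 0:
--                 s += '#'
--             else:
--                 s += '.'
--     else:
--         while len(s) < width:
--             if len(s) % 2 == 0:
--                 s += '.'
--             else:
--                 s += '#'
--     return s
-- ===== SOURCE B (Python) =====
-- def build_line(width, i):
--     unit = '#.' if i % 2 == 0 else '.#'
--     return (unit * (width // 2 + 1))[:width]
-- ===== Notes on version B (the rewrite author's own statement) =====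
-- stated objective: faster
-- what changed: replaces the per-character while-loop with parity branches by building the line in one shot as the repeated two-char unit ('#.' or '.#') sliced to width
import Mathlib
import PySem

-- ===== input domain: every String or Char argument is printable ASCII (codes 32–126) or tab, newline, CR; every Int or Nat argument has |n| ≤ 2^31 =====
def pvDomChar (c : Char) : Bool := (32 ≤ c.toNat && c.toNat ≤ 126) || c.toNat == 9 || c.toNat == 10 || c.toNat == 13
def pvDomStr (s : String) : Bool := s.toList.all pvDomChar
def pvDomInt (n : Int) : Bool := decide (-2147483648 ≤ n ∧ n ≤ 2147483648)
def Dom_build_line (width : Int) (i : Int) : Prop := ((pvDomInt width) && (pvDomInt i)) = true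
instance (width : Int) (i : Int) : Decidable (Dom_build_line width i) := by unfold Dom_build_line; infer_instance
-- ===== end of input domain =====

-- B builds the line in one shot as the repeated two-char unit sliced to width,
-- instead of A's per-character while-loop (objective: faster; measured).

-- ===== PORT A =====
-- A's while-loop: append '#' or '.' depending on the parity of len(s), until len(s) ≥ width.
def buildLoopA (width : Int) (c0 c1 : Char) (s : List Char) : List Char :=
  if (s.length : Int) < width then
    buildLoopA width c0 c1 (s ++ [if s.length % 2 == 0 then c0 else c1])
  else s
termination_by (width - s.length).toNat
decreasing_by
  simp only [List.length_append, List.length_cons, List.length_nil]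
  omega

def build_line (width : Int) (i : Int) : String :=
  if PySem.Int.mod i 2 == 0 then String.ofList (buildLoopA width '#' '.' [])
  else String.ofList (buildLoopA width '.' '#' [])

-- ===== PORT B =====
def build_line_alt (width : Int) (i : Int) : String :=
  let unit : List Char := if PySem.Int.mod i 2 == 0 then ['#', '.'] else ['.', '#']
  String.ofList (PySem.List.slice (PySem.List.pyRepeat unit (PySem.Int.floordiv width 2 + 1)) none (some width))

-- ===== PRECONDITION & SPEC =====
def Spec_build_line (width : Int) (i : Int) (out : String) : Prop := out = build_line_alt width i
instance (width : Int) (i : Int) (out : String) : Decidable (Spec_build_line width i out) := by unfold Spec_build_line; infer_instance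

-- ===== CLAIM (what is proved, stated in full; the proofs are below) =====
def Claim_equal_build_line : Prop := ∀ (width : Int) (i : Int), Dom_build_line width i → Spec_build_line width i (build_line width i)

-- ===== LEMMAS AND PROOFS =====

-- the alternating pattern of length w starting with c0
def patt (c0 c1 : Char) (w : Nat) : List Char :=
  (List.range w).map (fun k => if k % 2 == 0 then c0 else c1)

theorem patt_length (c0 c1 : Char) (w : Nat) : (patt c0 c1 w).length = w := by
  simp [patt]

theorem patt_succ (c0 c1 : Char) (n : Nat) :
    patt c0 c1 (n + 1) = patt c0 c1 n ++ [if n % 2 == 0 then c0 else c1] := by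
  simp [patt, List.range_succ]

theorem patt_two_add (c0 c1 : Char) (w : Nat) :
    patt c0 c1 (2 + w) = c0 :: c1 :: patt c0 c1 w := by
  simp [patt, List.range_add, Function.comp, Nat.add_mod_left, List.range_succ]

theorem buildLoopA_patt (width : Int) (c0 c1 : Char) :
    ∀ n : Nat, buildLoopA width c0 c1 (patt c0 c1 n) = patt c0 c1 (max n width.toNat) := by
  intro n
  by_cases h : (n : Int) < width
  · rw [buildLoopA]
    rw [if_pos (by rw [patt_length]; exact h)]
    simp only [patt_length]
    rw [← patt_succ]
    rw [buildLoopA_patt width c0 c1 (n + 1)]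
    congr 1
    omega
  · rw [buildLoopA]
    rw [if_neg (by rw [patt_length]; exact h)]
    congr 1
    omega
termination_by n => (width - n).toNat
decreasing_by omega

theorem take_patt (c0 c1 : Char) (w n : Nat) :
    (patt c0 c1 n).take w = patt c0 c1 (min w n) := by
  simp [patt, ← List.map_take, List.take_range]

theorem pyRepeat_pair (c0 c1 : Char) : ∀ m : Nat,
    PySem.List.pyRepeat [c0, c1] (m : Int) = patt c0 c1 (2 * m) := by
  intro m
  induction m with
  | zero => simp [PySem.List.pyRepeat, patt]
  | succ k ih =>
    have h1 : PySem.List.pyRepeat [c0, c1] ((k : Int) + 1)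
        = [c0, c1] ++ PySem.List.pyRepeat [c0, c1] (k : Int) := by
      simp [PySem.List.pyRepeat, List.replicate_succ]
    push_cast
    rw [h1, ih]
    have : 2 * (k + 1) = 2 + 2 * k := by omega
    rw [this, patt_two_add]
    rfl

-- B's value is the alternating pattern of length width.toNat
theorem alt_eq_patt (width : Int) (c0 c1 : Char) (hw : -2147483648 ≤ width) :
    PySem.List.slice (PySem.List.pyRepeat [c0, c1] (PySem.Int.floordiv width 2 + 1)) none (some width)
      = patt c0 c1 width.toNat := by
  have hfd : PySem.Int.floordiv width 2 = width / 2 := by simp [pysem]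
  by_cases h : 0 ≤ width
  · -- width ≥ 0: repeat count is width/2 + 1 ≥ 1; slice is a take
    have hm : PySem.Int.floordiv width 2 + 1 = ((width.toNat / 2 + 1 : Nat) : Int) := by
      rw [hfd]; omega
    rw [hm, pyRepeat_pair, PySem.List.slice_to _ h, take_patt]
    congr 1
    omega
  · -- width < 0: repeat count ≤ 0, repeated list is empty, slice of [] is []
    have hneg : width / 2 ≤ -1 := by
      calc width / 2 ≤ -1 / 2 := Int.ediv_le_ediv (by norm_num) (by omega)
        _ = -1 := by decide
    have hm : (PySem.Int.floordiv width 2 + 1).toNat = 0 := by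
      rw [hfd]; omega
    have hrep : PySem.List.pyRepeat ([c0, c1]) (PySem.Int.floordiv width 2 + 1) = ([] : List Char) := by
      simp only [PySem.List.pyRepeat, hm]
      simp
    have hw0 : width.toNat = 0 := by omega
    rw [hrep, hw0]
    simp [PySem.List.slice, patt]

-- A's value is the same pattern
theorem a_eq_patt (width : Int) (c0 c1 : Char) :
    buildLoopA width c0 c1 [] = patt c0 c1 width.toNat := by
  have h0 : ([] : List Char) = patt c0 c1 0 := by simp [patt]
  rw [h0, buildLoopA_patt]
  simp

-- ===== VERDICT (by name: the statement is the Claim_ definition above) =====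
theorem build_line_spec : Claim_equal_build_line := by
  intro width i hdom
  have hw : -2147483648 ≤ width := by
    simp only [Dom_build_line, pvDomInt, Bool.and_eq_true, decide_eq_true_eq] at hdom
    exact hdom.1.1
  unfold Spec_build_line build_line build_line_alt
  dsimp only
  by_cases h : (PySem.Int.mod i 2 == 0) = true
  · rw [if_pos h, if_pos h, a_eq_patt, alt_eq_patt width '#' '.' hw]
  · rw [if_neg h, if_neg h, a_eq_patt, alt_eq_patt width '.' '#' hw]
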